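-- pv_equiv track=rewrite | github.com/baconkev000/v1swivl-backend | accounts/dataforseo_utils.py | _is_excluded_competitor_domain
-- ===== SOURCE A (Python) =====
-- _EXCLUDED_COMPETITOR_DOMAIN_ROOTS = frozenset({
--     # Social / platforms
--     "facebook.com",
--     "instagram.com",
--     "tiktok.com",
--     "twitter.com",
--     "x.com",
--     "pinterest.com",
--     "linkedin.com",
--     # Directories / review aggregators
--     "yelp.com",
--     "thumbtack.com",
--     "angieslist.com",
--     "tripadvisor.com",
--     "yellowpages.com",
--     "mapquest.com",
--     # Other common aggregators/maps
--     "opentable.com",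
--     "foursquare.com",
--     "waze.com",
-- })
--
-- def _is_excluded_competitor_domain(domain: str) -> bool:
--     d = (domain or "").lower().strip()
--     if not d:
--         return True
--     if d in _EXCLUDED_COMPETITOR_DOMAIN_ROOTS:
--         return True
--     # Defensive: treat subdomains of excluded roots as excluded too.
--     for root in _EXCLUDED_COMPETITOR_DOMAIN_ROOTS:
--         if root and (d == root or d.endswith("." + root)):
--             return True
--     return False
-- ===== SOURCE B (Python) =====
-- _EXCLUDED_COMPETITOR_DOMAIN_ROOTS = frozenset({
--     "facebook.com",
--     "instagram.com",
--     "tiktok.com",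
--     "twitter.com",
--     "x.com",
--     "pinterest.com",
--     "linkedin.com",
--     "yelp.com",
--     "thumbtack.com",
--     "angieslist.com",
--     "tripadvisor.com",
--     "yellowpages.com",
--     "mapquest.com",
--     "opentable.com",
--     "foursquare.com",
--     "waze.com",
-- })
--
-- def _is_excluded_competitor_domain(domain: str) -> bool:
--     d = (domain or "").lower().strip()
--     if not d:
--         return True
--     # walk the chain of dot-suffixes of d itself; no scan over the root set
--     s = d
--     while True:
--         if s in _EXCLUDED_COMPETITOR_DOMAIN_ROOTS:
--             return True
--         dot = s.find(".")
--         if dot == -1: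
--             return False
--         s = s[dot + 1:]
-- ===== Notes on version B (the rewrite author's own statement) =====
-- stated objective: alternative
-- what changed: Instead of scanning every excluded root and testing whether the domain ends with a dot followed by that root, B walks the chain of dot-suffixes of the domain itself (repeatedly jumping past the first dot via find) and looks each suffix up in the frozenset, so the loop runs over the domain's own dots and never touches roots it cannot match.
import Mathlib
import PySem

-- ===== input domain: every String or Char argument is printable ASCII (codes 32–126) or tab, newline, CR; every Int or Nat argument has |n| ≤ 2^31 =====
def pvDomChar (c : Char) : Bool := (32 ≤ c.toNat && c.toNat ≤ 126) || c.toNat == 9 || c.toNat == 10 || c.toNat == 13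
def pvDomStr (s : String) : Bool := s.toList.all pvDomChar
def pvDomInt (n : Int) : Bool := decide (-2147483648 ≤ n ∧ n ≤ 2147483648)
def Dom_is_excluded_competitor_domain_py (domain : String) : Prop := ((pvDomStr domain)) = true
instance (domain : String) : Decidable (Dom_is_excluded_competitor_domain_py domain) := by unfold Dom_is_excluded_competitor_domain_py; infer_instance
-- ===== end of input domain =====

-- B replaces A's scan over every excluded root with endswith by a loop walking the chain of
-- dot-suffixes of the domain itself, looking each suffix up in the root set (alternative; not faster).

-- the module constant _EXCLUDED_COMPETITOR_DOMAIN_ROOTS (order irrelevant: only boolean membership/any over it is computed)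
def pvRoots : List (List Char) :=
  ["facebook.com".toList, "instagram.com".toList, "tiktok.com".toList, "twitter.com".toList,
   "x.com".toList, "pinterest.com".toList, "linkedin.com".toList, "yelp.com".toList,
   "thumbtack.com".toList, "angieslist.com".toList, "tripadvisor.com".toList,
   "yellowpages.com".toList, "mapquest.com".toList, "opentable.com".toList,
   "foursquare.com".toList, "waze.com".toList]

-- ===== PORT A =====
def is_excluded_competitor_domain_py (domain : String) : Bool :=
  let d := PySem.Chars.strip (PySem.Chars.lower domain.toList)
  if d = [] then true
  else if pvRoots.contains d then true
  else pvRoots.any (fun root => !root.isEmpty && (d == root || PySem.Chars.endswith d ('.' :: root)))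

-- ===== PORT B =====
-- the 'while True' loop of Source B: keep jumping past the first dot, looking each suffix up
def pvSuffixLoop (s : List Char) : Bool :=
  if pvRoots.contains s then true
  else
    let dot := PySem.Chars.find s ['.']
    if h : dot = -1 then false
    else
      pvSuffixLoop (PySem.List.slice s (some (dot + 1)) none)
termination_by s.length
decreasing_by
  have hge := PySem.Chars.neg_one_le_find s ['.']
  have h0 : 0 ≤ PySem.Chars.find s ['.'] := by omega
  have hinf : ['.'] <:+: s := (PySem.Chars.find_ne_neg_one_iff s ['.']).mp h
  have hne : s ≠ [] := by rintro rfl; simp at hinf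
  have hk : PySem.Chars.find s ['.'] + 1 = (((PySem.Chars.find s ['.']).toNat + 1 : Nat) : Int) := by omega
  rw [hk, PySem.List.slice_from_natCast]
  have hlen : 0 < s.length := List.length_pos_iff.mpr hne
  simp only [List.length_drop]
  omega

def is_excluded_competitor_domain_py_alt (domain : String) : Bool :=
  let d := PySem.Chars.strip (PySem.Chars.lower domain.toList)
  if d = [] then true
  else pvSuffixLoop d

-- ===== PRECONDITION & SPEC =====
def Spec_is_excluded_competitor_domain_py (domain : String) (out : Bool) : Prop := out = is_excluded_competitor_domain_py_alt domain
instance (domain : String) (out : Bool) : Decidable (Spec_is_excluded_competitor_domain_py domain out) := by unfold Spec_is_excluded_competitor_domain_py; infer_instance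

-- ===== CLAIM (what is proved, stated in full; the proofs are below) =====
def Claim_equal_is_excluded_competitor_domain_py : Prop := ∀ (domain : String), Dom_is_excluded_competitor_domain_py domain → Spec_is_excluded_competitor_domain_py domain (is_excluded_competitor_domain_py domain)

-- ===== LEMMAS AND PROOFS =====

-- '.'++r is a suffix of d  ↔  r is the part of d after the dot at some position k
theorem pv_dot_suffix_iff (d r : List Char) :
    ('.' :: r) <:+ d ↔ ∃ k, ∃ _ : k < d.length, d[k] = '.' ∧ d.drop (k + 1) = r := by
  constructor
  · rintro ⟨t, rfl⟩
    refine ⟨t.length, by simp, ?_, ?_⟩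
    · simp
    · simp [List.drop_append]
  · rintro ⟨k, hk, hdot, hdrop⟩
    refine ⟨d.take k, ?_⟩
    have h : d.drop k = '.' :: r := by
      rw [List.drop_eq_getElem_cons hk, hdot, hdrop]
    rw [← h, List.take_append_drop]

-- the suffix loop decides: s itself or some dot-suffix of s is an excluded root
theorem pv_loop_iff (s : List Char) :
    pvSuffixLoop s = true ↔ s ∈ pvRoots ∨ ∃ r ∈ pvRoots, ('.' :: r) <:+ s := by
  rw [pvSuffixLoop]
  by_cases hc : pvRoots.contains s = true
  · rw [if_pos hc]
    simp only [true_iff]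
    exact Or.inl (by simpa [List.contains_eq_mem] using hc)
  · rw [if_neg hc]
    have hcm : s ∉ pvRoots := by simpa [List.contains_eq_mem] using hc
    by_cases hfind : PySem.Chars.find s ['.'] = -1
    · rw [dif_pos hfind]
      have hni : ¬ ['.'] <:+: s := (PySem.Chars.find_eq_neg_one_iff s ['.']).mp hfind
      simp only [Bool.false_eq_true, false_iff]
      rintro (h | ⟨r, -, hsuf⟩)
      · exact hcm h
      · exact hni ((List.IsPrefix.isInfix ⟨r, rfl⟩).trans hsuf.isInfix)
    · rw [dif_neg hfind]
      have hge := PySem.Chars.neg_one_le_find s ['.']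
      have h0 : 0 ≤ PySem.Chars.find s ['.'] := by omega
      set k := (PySem.Chars.find s ['.']).toNat with hkdef
      have hk1 : PySem.Chars.find s ['.'] + 1 = ((k + 1 : Nat) : Int) := by omega
      rw [hk1, PySem.List.slice_from_natCast]
      obtain ⟨hpre, hmin⟩ := PySem.Chars.find_spec h0
      obtain ⟨t, ht⟩ := hpre
      have hkl : k < s.length := by
        have h2 := congrArg List.length ht
        simp only [List.length_append, List.length_cons, List.length_nil,
          List.length_drop] at h2
        omega
      have h3 : s[k] :: s.drop (k + 1) = '.' :: t := by
        rw [← List.drop_eq_getElem_cons hkl, ← ht]; rfl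
      have hdot : s[k] = '.' := by injection h3
      have hdropt : s.drop (k + 1) = t := by injection h3
      have ih := pv_loop_iff (s.drop (k + 1))
      rw [ih]
      constructor
      · rintro (h | ⟨r, hr, hsuf⟩)
        · exact Or.inr ⟨s.drop (k + 1), h, (pv_dot_suffix_iff s _).mpr ⟨k, hkl, hdot, rfl⟩⟩
        · exact Or.inr ⟨r, hr, hsuf.trans (List.drop_suffix _ _)⟩
      · rintro (h | ⟨r, hr, hsuf⟩)
        · exact absurd h hcm
        · rcases (pv_dot_suffix_iff s r).mp hsuf with ⟨j, hj, hjdot, hjdrop⟩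
          have hjk : k ≤ j := by
            by_contra hlt
            rw [Nat.not_le] at hlt
            exact hmin j hlt ⟨s.drop (j + 1), by
              show '.' :: s.drop (j + 1) = s.drop j
              rw [List.drop_eq_getElem_cons hj, hjdot]⟩
          rcases Nat.eq_or_lt_of_le hjk with rfl | hlt
          · exact Or.inl (hjdrop ▸ hr)
          · refine Or.inr ⟨r, hr, ?_⟩
            refine List.suffix_of_suffix_length_le hsuf (List.drop_suffix (k + 1) s) ?_
            have hlr : ('.' :: r).length = s.length - j := by
              rw [← hjdrop]
              simp only [List.length_cons, List.length_drop]
              omega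
            simp only [List.length_drop]
            omega
termination_by s.length
decreasing_by simp only [List.length_drop]; omega

-- A's root scan, restated: membership of d or a dot-suffix condition
theorem pv_scan_iff (d : List Char) :
    (pvRoots.any (fun root => !root.isEmpty && (d == root || PySem.Chars.endswith d ('.' :: root)))) = true
      ↔ d ∈ pvRoots ∨ ∃ r ∈ pvRoots, ('.' :: r) <:+ d := by
  simp only [List.any_eq_true, Bool.and_eq_true, Bool.or_eq_true, beq_iff_eq,
    Bool.not_eq_true', List.isEmpty_eq_false_iff, PySem.Chars.endswith_iff]
  constructor
  · rintro ⟨r, hr, -, rfl | hs⟩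
    · exact Or.inl hr
    · exact Or.inr ⟨r, hr, hs⟩
  · rintro (hd | ⟨r, hr, hs⟩)
    · exact ⟨d, hd, by rintro rfl; revert hd; decide, Or.inl rfl⟩
    · exact ⟨r, hr, by rintro rfl; revert hr; decide, Or.inr hs⟩

-- ===== VERDICT (by name: the statement is the Claim_ definition above) =====
theorem is_excluded_competitor_domain_py_spec : Claim_equal_is_excluded_competitor_domain_py := by
  intro domain _
  unfold Spec_is_excluded_competitor_domain_py
  unfold is_excluded_competitor_domain_py is_excluded_competitor_domain_py_alt
  set d := PySem.Chars.strip (PySem.Chars.lower domain.toList) with hd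
  by_cases h0 : d = []
  · simp [h0]
  · simp only [h0, if_false]
    by_cases hc : pvRoots.contains d
    · simp only [hc, if_true]
      symm
      rw [pv_loop_iff]
      exact Or.inl (by simpa [List.contains_eq_mem] using hc)
    · simp only [hc, Bool.false_eq_true, if_false]
      rw [Bool.eq_iff_iff, pv_scan_iff, pv_loop_iff]
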